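-- pv_equiv track=rewrite | github.com/yonasBSD/stalwart-mail-server | resources/scripts/ossify.py | find_first_comment_block
-- ===== SOURCE A (Python) =====
-- from typing import List, Tuple, Optional
--
-- def find_first_comment_block(content: str) -> Optional[str]:
--     """
--     Find the first comment block in a Rust file.
--     Returns the comment content or None if no comment block is found.
--     """
--     # Remove leading whitespace and find the first comment
--     lines = content.strip().split('\n')
--
--     if not lines:
--         return None
--
--     first_line = lines[0].strip()
--
--     # Check for block comment starting with /*
--     if first_line.startswith('/*'):
--         comment_lines = []
--         in_comment = True
--
--         for line in lines:
--             if in_comment: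
--                 comment_lines.append(line)
--                 if '*/' in line:
--                     break
--
--         return '\n'.join(comment_lines)
--
--     # Check for line comments starting with //
--     elif first_line.startswith('//'):
--         comment_lines = []
--
--         for line in lines:
--             stripped = line.strip()
--             if stripped.startswith('//'):
--                 comment_lines.append(line)
--             elif stripped == '':
--                 comment_lines.append(line)  # Keep empty lines within comment block
--             else:
--                 break  # Stop at first non-comment, non-empty line
--
--         return '\n'.join(comment_lines)
--
--     return None
-- ===== SOURCE B (Python) =====
-- def find_first_comment_block(content):
--     """
--     Find the first comment block in a Rust file.
--     Returns the comment content or None if no comment block is found.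
--     """
--     text = content.strip()
--     lines = text.split('\n')
--     first_line = lines[0].strip()
--
--     if first_line.startswith('/*'):
--         # Keep everything up to the end of the line holding the first '*/'
--         # (the whole text if '*/' never appears).
--         pos = text.find('*/')
--         if pos == -1:
--             return text
--         nl = text.find('\n', pos)
--         return text if nl == -1 else text[:nl]
--
--     if first_line.startswith('//'):
--         # Cut at the first line that is neither a '//' comment nor blank.
--         stop = next((i for i, line in enumerate(lines)
--                      if not (line.strip().startswith('//') or not line.strip())),
--                     len(lines))
--         return '\n'.join(lines[:stop])
--
--     return None
-- ===== Notes on version B (the rewrite author's own statement) =====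
-- stated objective: alternative
-- what changed: A's two accumulate-and-break line loops are replaced by a closing-delimiter substring search on the whole stripped text plus a slice up to the following newline (block-comment case) and by a first-bad-line index search via next(enumerate(...)) with take/join (line-comment case).
import Mathlib
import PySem

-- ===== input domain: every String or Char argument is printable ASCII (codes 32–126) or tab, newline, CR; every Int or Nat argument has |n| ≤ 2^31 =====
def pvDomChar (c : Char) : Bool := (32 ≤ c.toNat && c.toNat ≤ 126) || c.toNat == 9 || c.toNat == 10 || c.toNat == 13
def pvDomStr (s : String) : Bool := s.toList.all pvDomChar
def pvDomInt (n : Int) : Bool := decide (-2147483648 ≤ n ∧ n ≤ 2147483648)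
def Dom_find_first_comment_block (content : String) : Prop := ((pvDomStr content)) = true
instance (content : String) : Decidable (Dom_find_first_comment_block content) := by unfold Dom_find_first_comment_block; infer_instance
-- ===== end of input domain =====

-- B replaces A's two accumulate-and-break loops: the block-comment case becomes a
-- closing-delimiter substring search on the whole text plus a slice to the next newline,
-- the line-comment case a first-bad-line index search with take/join
-- (objective: alternative decomposition, same asymptotic cost).

-- ===== PORT A =====
-- the 'for line in lines' loop of the '/*' branch (state: in_comment, comment_lines; break = stop)
def pvABlockLoop (in_comment : Bool) (comment_lines : List String) : List String → List String
  | [] => comment_lines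
  | line :: rest =>
    if in_comment then
      let comment_lines' := comment_lines ++ [line]
      if PySem.Str.isIn "*/" line then comment_lines'
      else pvABlockLoop in_comment comment_lines' rest
    else pvABlockLoop in_comment comment_lines rest

-- the 'for line in lines' loop of the '//' branch (break = return accumulator)
def pvALineLoop (comment_lines : List String) : List String → List String
  | [] => comment_lines
  | line :: rest =>
    let stripped := PySem.Str.strip line
    if PySem.Str.startswith stripped "//" then pvALineLoop (comment_lines ++ [line]) rest
    else if stripped = "" then pvALineLoop (comment_lines ++ [line]) rest
    else comment_lines

def find_first_comment_block (content : String) : Option String :=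
  let lines := (PySem.Str.split? (PySem.Str.strip content) "\n").getD []
  match lines with
  | [] => none            -- 'if not lines: return None' (unreachable: split always yields ≥ 1 piece)
  | first :: _ =>
    let first_line := PySem.Str.strip first
    if PySem.Str.startswith first_line "/*" then
      some (PySem.Str.join "\n" (pvABlockLoop true [] lines))
    else if PySem.Str.startswith first_line "//" then
      some (PySem.Str.join "\n" (pvALineLoop [] lines))
    else none

-- ===== PORT B =====
-- Source B's generator predicate: line is NOT part of the '//' comment block
def pvBBad (line : String) : Bool :=
  !(PySem.Str.startswith (PySem.Str.strip line) "//" || PySem.Str.strip line == "")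

def find_first_comment_block_alt (content : String) : Option String :=
  let text := PySem.Str.strip content
  let lines := (PySem.Str.split? text "\n").getD []
  let first_line := PySem.Str.strip (lines.headD "")
  if PySem.Str.startswith first_line "/*" then
    let pos := PySem.Str.find text "*/"
    if pos = -1 then some text
    else
      let nl := PySem.Str.findFrom text "\n" pos none
      if nl = -1 then some text else some (PySem.Str.slice text none (some nl))
  else if PySem.Str.startswith first_line "//" then
    let stop := (lines.findIdx? pvBBad).getD lines.length
    some (PySem.Str.join "\n" (lines.take stop))
  else none

-- ===== PRECONDITION & SPEC =====
def Spec_find_first_comment_block (content : String) (out : Option String) : Prop := out = find_first_comment_block_alt content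
instance (content : String) (out : Option String) : Decidable (Spec_find_first_comment_block content out) := by unfold Spec_find_first_comment_block; infer_instance

-- ===== CLAIM (what is proved, stated in full; the proofs are below) =====
def Claim_equal_find_first_comment_block : Prop := ∀ (content : String), Dom_find_first_comment_block content → Spec_find_first_comment_block content (find_first_comment_block content)

-- ===== LEMMAS AND PROOFS =====


def splitNl : List Char → List (List Char)
  | [] => [[]]
  | c :: r =>
    if c = '\n' then [] :: splitNl r
    else
      match splitNl r with
      | [] => [[c]]
      | h :: tl => (c :: h) :: tl

def consHd (x : List Char) : List (List Char) → List (List Char)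
  | [] => [x]
  | h :: tl => (x ++ h) :: tl

lemma splitNl_ne_nil (t : List Char) : splitNl t ≠ [] := by
  cases t with
  | nil => simp [splitNl]
  | cons c r =>
    simp only [splitNl]
    split
    · simp
    · split <;> simp


lemma go_eq' : ∀ (fuel : Nat) (l cur : List Char) (acc : List (List Char)), l.length < fuel →
    PySem.Chars.splitOn.go ['\n'] fuel l cur acc = acc.reverse ++ consHd cur.reverse (splitNl l) := by
  intro fuel
  induction fuel with
  | zero => intro l cur acc h; omega
  | succ f ih =>
    intro l cur acc h
    cases l with
    | nil =>
      simp [PySem.Chars.splitOn.go, consHd, splitNl]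
    | cons c rest =>
      rw [PySem.Chars.splitOn.go]
      by_cases hc : c = '\n'
      · have hp : List.isPrefixOf ['\n'] (c :: rest) = true := by
          simp [List.isPrefixOf, hc]
        simp only [hp, if_pos]
        rw [ih _ _ _ (by simpa using Nat.lt_of_succ_lt_succ h)]
        simp only [splitNl, if_pos hc]
        rcases hsp : splitNl rest with _ | ⟨h1, tl⟩
        · exact absurd hsp (splitNl_ne_nil rest)
        · simp [consHd, hsp]
      · have hp : List.isPrefixOf ['\n'] (c :: rest) = false := by
          simp [List.isPrefixOf]; exact fun hh => absurd hh.symm hc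
        simp only [hp]
        rw [if_neg (by simp)]
        rw [ih _ _ _ (by simpa using Nat.lt_of_succ_lt_succ h)]
        simp only [splitNl, if_neg hc]
        rcases hsp : splitNl rest with _ | ⟨h1, tl⟩
        · exact absurd hsp (splitNl_ne_nil rest)
        · simp [consHd]

lemma splitOn_nl (t : List Char) : PySem.Chars.splitOn t ['\n'] = splitNl t := by
  rw [PySem.Chars.splitOn, go_eq' _ _ _ _ (by omega)]
  rcases hsp : splitNl t with _ | ⟨h1, tl⟩
  · exact absurd hsp (splitNl_ne_nil t)
  · simp [consHd]

lemma nl_not_mem_splitNl : ∀ (t : List Char), ∀ l ∈ splitNl t, '\n' ∉ l := by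
  intro t
  induction t with
  | nil => intro l hl; simp [splitNl] at hl; simp [hl]
  | cons c r ih =>
    intro l hl
    simp only [splitNl] at hl
    by_cases hc : c = '\n'
    · rw [if_pos hc] at hl
      rw [List.mem_cons] at hl
      rcases hl with hl | hl
      · simp [hl]
      · exact ih l hl
    · rw [if_neg hc] at hl
      rcases hsp : splitNl r with _ | ⟨h1, tl⟩
      · exact absurd hsp (splitNl_ne_nil r)
      · rw [hsp, List.mem_cons] at hl
        rcases hl with hl | hl
        · subst hl
          intro hmem
          rw [List.mem_cons] at hmem
          rcases hmem with hmem | hmem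
          · exact hc hmem.symm
          · exact ih h1 (by simp [hsp]) hmem
        · exact ih l (by simp [hsp, hl])

lemma join_splitNl (t : List Char) : PySem.Chars.join ['\n'] (splitNl t) = t := by
  induction t with
  | nil => simp [splitNl, PySem.Chars.join, List.intercalate]
  | cons c r ih =>
    simp only [splitNl]
    by_cases hc : c = '\n'
    · rw [if_pos hc]
      rcases hsp : splitNl r with _ | ⟨h1, tl⟩
      · exact absurd hsp (splitNl_ne_nil r)
      · rw [hsp] at ih
        rw [PySem.Chars.join_cons_cons]
        simp [hc, ← ih]
    · rw [if_neg hc]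
      rcases hsp : splitNl r with _ | ⟨h1, tl⟩
      · exact absurd hsp (splitNl_ne_nil r)
      · rw [hsp] at ih
        cases tl with
        | nil => simpa [PySem.Chars.join_singleton] using congrArg (c :: ·) ih
        | cons y tl' =>
          rw [PySem.Chars.join_cons_cons] at ih ⊢
          simp only [← ih]
          simp


lemma pair_prefix_iff (x y : Char) (s : List Char) :
    [x, y] <+: s ↔ s[0]? = some x ∧ s[1]? = some y := by
  match s with
  | [] => simp
  | [a] => simp [List.cons_prefix_cons]
  | a :: b :: z => simp [List.cons_prefix_cons, eq_comm]

lemma single_prefix_iff (x : Char) (s : List Char) :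
    [x] <+: s ↔ s[0]? = some x := by
  match s with
  | [] => simp
  | a :: z => simp [List.cons_prefix_cons, eq_comm]

lemma pair_prefix_drop_iff (x y : Char) (t : List Char) (i : Nat) :
    [x, y] <+: t.drop i ↔ t[i]? = some x ∧ t[i + 1]? = some y := by
  rw [pair_prefix_iff, List.getElem?_drop, List.getElem?_drop]
  simp

lemma single_prefix_drop_iff (x : Char) (t : List Char) (i : Nat) :
    [x] <+: t.drop i ↔ t[i]? = some x := by
  rw [single_prefix_iff, List.getElem?_drop]
  simp

lemma find_eq_nat (s sub : List Char) (k : Nat) (h1 : sub <+: s.drop k)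
    (h2 : ∀ i < k, ¬ sub <+: s.drop i) : PySem.Chars.find s sub = (k : Int) := by
  have hin : PySem.Chars.isIn sub s = true :=
    (PySem.Chars.exists_prefix_drop_iff_isIn sub s).mp ⟨k, h1⟩
  have hnn : 0 ≤ PySem.Chars.find s sub :=
    (PySem.Chars.find_nonneg_iff s sub).mpr ((PySem.Chars.isIn_iff_infix sub s).mp hin)
  obtain ⟨hpre, hmin⟩ := PySem.Chars.find_spec hnn
  have heq : (PySem.Chars.find s sub).toNat = k := by
    by_contra hne
    rcases Nat.lt_or_ge (PySem.Chars.find s sub).toNat k with hlt | hge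
    · exact h2 _ hlt hpre
    · exact hmin k (lt_of_le_of_ne hge (Ne.symm hne)) h1
  omega

lemma find_eq_neg_of_all (s sub : List Char) (h : ∀ i : Nat, ¬ sub <+: s.drop i) :
    PySem.Chars.find s sub = -1 := by
  rw [PySem.Chars.find_eq_neg_one_iff]
  intro hinf
  rw [← PySem.Chars.isIn_iff_infix] at hinf
  obtain ⟨j, hj⟩ := (PySem.Chars.exists_prefix_drop_iff_isIn sub s).mpr hinf
  exact h j hj

lemma find_nl_none (t : List Char) (k : Nat) (hno : '\n' ∉ t) :
    PySem.Chars.find (t.drop k) ['\n'] = -1 := by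
  apply find_eq_neg_of_all
  intro i
  rw [List.drop_drop, single_prefix_drop_iff]
  intro hc
  exact hno (List.mem_of_getElem? hc)

-- occurrence of "*/" found inside a transfers to a ++ '\n' :: r
lemma find_append_found (a r : List Char) (k : Nat)
    (h : PySem.Chars.find a ['*', '/'] = (k : Int)) :
    PySem.Chars.find (a ++ '\n' :: r) ['*', '/'] = (k : Int) := by
  have hnn : 0 ≤ PySem.Chars.find a ['*', '/'] := by rw [h]; positivity
  obtain ⟨hpre, hmin⟩ := PySem.Chars.find_spec hnn
  rw [h] at hpre hmin
  simp only [Int.toNat_natCast] at hpre hmin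
  rw [pair_prefix_drop_iff] at hpre
  obtain ⟨hl2, -⟩ := List.getElem?_eq_some_iff.mp hpre.2
  apply find_eq_nat
  · rw [pair_prefix_drop_iff,
      List.getElem?_append_left (by omega), List.getElem?_append_left (by omega)]
    exact hpre
  · intro i hi
    have him := hmin i hi
    rw [pair_prefix_drop_iff] at him ⊢
    rw [List.getElem?_append_left (by omega), List.getElem?_append_left (by omega)]
    exact him

lemma find_append_none (a r : List Char)
    (ha : PySem.Chars.find a ['*', '/'] = -1) :
    PySem.Chars.find (a ++ '\n' :: r) ['*', '/'] =
      if PySem.Chars.find r ['*', '/'] = -1 then -1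
      else (a.length : Int) + 1 + PySem.Chars.find r ['*', '/'] := by
  have hae : ∀ i : Nat, ¬ ['*', '/'] <+: a.drop i := by
    intro i hi
    have hii : PySem.Chars.isIn ['*', '/'] a = true :=
      (PySem.Chars.exists_prefix_drop_iff_isIn _ a).mp ⟨i, hi⟩
    rw [PySem.Chars.find_eq_neg_one_iff] at ha
    exact ha ((PySem.Chars.isIn_iff_infix _ a).mp hii)
  have hlow : ∀ i : Nat, i ≤ a.length → ¬ ['*', '/'] <+: (a ++ '\n' :: r).drop i := by
    intro i hi hp
    rw [pair_prefix_drop_iff] at hp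
    rcases Nat.lt_or_ge (i + 1) a.length with h1 | h1
    · exact hae i (by
        rw [pair_prefix_drop_iff]
        rwa [List.getElem?_append_left (by omega), List.getElem?_append_left (by omega)] at hp)
    · rcases Nat.eq_or_lt_of_le hi with he | hlt
      · -- i = a.length : first char is '\n'
        have h0 := hp.1
        rw [he, List.getElem?_append_right (by omega)] at h0
        simp at h0
      · -- i + 1 = a.length : second char is '\n'
        have h2 : i + 1 = a.length := by omega
        have h0 := hp.2
        rw [List.getElem?_append_right (by omega), h2] at h0
        simp at h0
  by_cases hr : PySem.Chars.find r ['*', '/'] = -1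
  · rw [if_pos hr]
    apply find_eq_neg_of_all
    intro i hp
    rcases Nat.lt_or_ge i (a.length + 1) with hi | hi
    · exact hlow i (by omega) hp
    · have hre : ∀ j : Nat, ¬ ['*', '/'] <+: r.drop j := by
        intro j hj
        have hii : PySem.Chars.isIn ['*', '/'] r = true :=
          (PySem.Chars.exists_prefix_drop_iff_isIn _ r).mp ⟨j, hj⟩
        rw [PySem.Chars.find_eq_neg_one_iff] at hr
        exact hr ((PySem.Chars.isIn_iff_infix _ r).mp hii)
      apply hre (i - a.length - 1)
      rw [pair_prefix_drop_iff] at hp ⊢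
      rw [List.getElem?_append_right (by omega), List.getElem?_append_right (by omega)] at hp
      rcases hp with ⟨hp1, hp2⟩
      constructor
      · rw [show i - a.length = (i - a.length - 1) + 1 by omega] at hp1
        simpa using hp1
      · rw [show i + 1 - a.length = (i - a.length - 1) + 1 + 1 by omega] at hp2
        simpa using hp2
  · rw [if_neg hr]
    have hnn : 0 ≤ PySem.Chars.find r ['*', '/'] := by
      have := PySem.Chars.neg_one_le_find (s := r) (sub := ['*', '/'])
      omega
    set p := (PySem.Chars.find r ['*', '/']).toNat with hp
    have hfr : PySem.Chars.find r ['*', '/'] = (p : Int) := by omega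
    obtain ⟨hpre, hmin⟩ := PySem.Chars.find_spec hnn
    rw [← hp] at hpre hmin
    rw [pair_prefix_drop_iff] at hpre
    have key : PySem.Chars.find (a ++ '\n' :: r) ['*', '/'] = ((a.length + 1 + p : Nat) : Int) := by
      apply find_eq_nat
      · rw [pair_prefix_drop_iff,
          List.getElem?_append_right (by omega), List.getElem?_append_right (by omega)]
        rw [show a.length + 1 + p - a.length = p + 1 by omega,
          show a.length + 1 + p + 1 - a.length = p + 1 + 1 by omega]
        simpa using hpre
      · intro i hi hpp
        rcases Nat.lt_or_ge i (a.length + 1) with hile | higt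
        · exact hlow i (by omega) hpp
        · apply hmin (i - a.length - 1) (by omega)
          rw [pair_prefix_drop_iff] at hpp ⊢
          rw [List.getElem?_append_right (by omega), List.getElem?_append_right (by omega)] at hpp
          rcases hpp with ⟨hp1, hp2⟩
          constructor
          · rw [show i - a.length = (i - a.length - 1) + 1 by omega] at hp1
            simpa using hp1
          · rw [show i + 1 - a.length = (i - a.length - 1) + 1 + 1 by omega] at hp2
            simpa using hp2
    rw [key, hfr]
    push_cast
    ring

lemma find_nl_drop (a r : List Char) (k : Nat) (hno : '\n' ∉ a) (hk : k ≤ a.length) :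
    PySem.Chars.find ((a ++ '\n' :: r).drop k) ['\n'] = ((a.length - k : Nat) : Int) := by
  apply find_eq_nat
  · rw [List.drop_drop, single_prefix_drop_iff,
      show k + (a.length - k) = a.length by omega,
      List.getElem?_append_right (by omega)]
    simp
  · intro i hi
    rw [List.drop_drop, single_prefix_drop_iff,
      List.getElem?_append_left (by omega)]
    intro hc
    exact hno (List.mem_of_getElem? hc)

lemma drop_shift (a r : List Char) (q : Nat) :
    (a ++ '\n' :: r).drop (a.length + 1 + q) = r.drop q := by
  rw [show a.length + 1 + q = a.length + (q + 1) by omega, List.drop_append]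
  rw [List.drop_eq_nil_of_le (by omega), List.nil_append, show a.length + (q + 1) - a.length = q + 1 by omega, List.drop_succ_cons]

def gBlock : List (List Char) → List (List Char)
  | [] => []
  | a :: ls => if PySem.Chars.isIn ['*', '/'] a then [a] else a :: gBlock ls

def pvCB (t : List Char) : List Char :=
  let pos := PySem.Chars.find t ['*', '/']
  if pos = -1 then t
  else
    let nl := PySem.Chars.findFrom t ['\n'] pos none
    if nl = -1 then t else PySem.List.slice t none (some nl)

lemma find_cases (s sub : List Char) :
    PySem.Chars.find s sub = -1 ∨
      ∃ k : Nat, PySem.Chars.find s sub = (k : Int) := by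
  have := PySem.Chars.neg_one_le_find (s := s) (sub := sub)
  rcases eq_or_ne (PySem.Chars.find s sub) (-1) with h | h
  · exact Or.inl h
  · exact Or.inr ⟨(PySem.Chars.find s sub).toNat, by omega⟩

lemma slice_none_natCast (t : List Char) (n : Nat) :
    PySem.List.slice t none (some (n : Int)) = t.take n := by
  simp [pysem]

-- pvCB is the identity on a single '\n'-free line
lemma pvCB_single (a : List Char) (hno : '\n' ∉ a) : pvCB a = a := by
  unfold pvCB
  rcases find_cases a ['*', '/'] with h | ⟨k, h⟩
  · simp [h]
  · rw [h]
    have hk : k ≤ a.length := by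
      have := PySem.Chars.find_le_length (s := a) (sub := ['*', '/'])
      omega
    rw [if_neg (by omega), PySem.Chars.findFrom_natCast a ['\n'] k hk,
      find_nl_none a k hno]
    simp

lemma gBlock_ne_nil (a : List Char) (ls : List (List Char)) : gBlock (a :: ls) ≠ [] := by
  unfold gBlock
  split <;> simp

lemma pvCB_step (a r : List Char)
    (hfa : PySem.Chars.find a ['*', '/'] = -1) :
    pvCB (a ++ '\n' :: r) = a ++ '\n' :: pvCB r := by
  have hft := find_append_none a r hfa
  rcases find_cases r ['*', '/'] with hfr | ⟨p, hfr⟩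
  · rw [hfr, if_pos rfl] at hft
    simp only [pvCB, hft, hfr]
    norm_num
  · rw [hfr, if_neg (by omega)] at hft
    have hnn : 0 ≤ PySem.Chars.find r ['*', '/'] := by rw [hfr]; positivity
    have hple : p + 1 < r.length := by
      obtain ⟨hpre, -⟩ := PySem.Chars.find_spec hnn
      rw [hfr] at hpre
      simp only [Int.toNat_natCast] at hpre
      rw [pair_prefix_drop_iff] at hpre
      obtain ⟨h2, -⟩ := List.getElem?_eq_some_iff.mp hpre.2
      omega
    have hcast : (a.length : Int) + 1 + (p : Int) = ((a.length + 1 + p : Nat) : Int) := by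
      push_cast; ring
    rw [hcast] at hft
    have hffL : PySem.Chars.findFrom (a ++ '\n' :: r) ['\n'] ((a.length + 1 + p : Nat) : Int) none =
        if PySem.Chars.find (r.drop p) ['\n'] = -1 then -1
        else ((a.length + 1 + p : Nat) : Int) + PySem.Chars.find (r.drop p) ['\n'] := by
      rw [PySem.Chars.findFrom_natCast _ _ _ (by simp; omega), drop_shift]
    have hffR : PySem.Chars.findFrom r ['\n'] ((p : Nat) : Int) none =
        if PySem.Chars.find (r.drop p) ['\n'] = -1 then -1
        else ((p : Nat) : Int) + PySem.Chars.find (r.drop p) ['\n'] :=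
      PySem.Chars.findFrom_natCast _ _ _ (by omega)
    rcases find_cases (r.drop p) ['\n'] with hq | ⟨q, hq⟩
    · rw [hq, if_pos rfl] at hffL hffR
      simp only [pvCB, hft, hfr, hffL, hffR]
      norm_num
    · rw [hq, if_neg (by omega)] at hffL hffR
      simp only [pvCB, hft, hfr, hffL, hffR]
      rw [if_neg (show ¬(((a.length + 1 + p : Nat) : Int) = -1) by omega),
        if_neg (show ¬(((p : Nat) : Int) = -1) by omega),
        if_neg (show ¬(((a.length + 1 + p : Nat) : Int) + (q : Int) = -1) by omega),
        if_neg (show ¬(((p : Nat) : Int) + (q : Int) = -1) by omega)]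
      have hc1 : ((a.length + 1 + p : Nat) : Int) + (q : Int) = ((a.length + (1 + (p + q)) : Nat) : Int) := by
        push_cast; ring
      have hc2 : ((p : Nat) : Int) + (q : Int) = ((p + q : Nat) : Int) := by push_cast; ring
      rw [hc1, hc2, slice_none_natCast, slice_none_natCast,
        show a.length + (1 + (p + q)) = a.length + ((p + q) + 1) by omega,
        List.take_append]
      simp

lemma M : ∀ ls : List (List Char), ls ≠ [] → (∀ l ∈ ls, '\n' ∉ l) →
    pvCB (PySem.Chars.join ['\n'] ls) = PySem.Chars.join ['\n'] (gBlock ls) := by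
  intro ls
  induction ls with
  | nil => intro h; exact absurd rfl h
  | cons a ls' ih =>
    intro _ hno
    have hna : '\n' ∉ a := hno a (by simp)
    cases ls' with
    | nil =>
      rw [PySem.Chars.join_singleton]
      have hg1 : gBlock [a] = [a] := by
        rw [show gBlock [a] = if PySem.Chars.isIn ['*', '/'] a = true then [a] else a :: gBlock [] from rfl]
        split <;> simp [gBlock]
      rw [hg1, PySem.Chars.join_singleton]
      exact pvCB_single a hna
    | cons b ls'' =>
      have hno' : ∀ l ∈ b :: ls'', '\n' ∉ l := fun l hl => hno l (by simp [hl])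
      have ihr := ih (by simp) hno'
      set r := PySem.Chars.join ['\n'] (b :: ls'') with hr
      have hj : PySem.Chars.join ['\n'] (a :: b :: ls'') = a ++ '\n' :: r := by
        rw [PySem.Chars.join_cons_cons, ← hr, List.append_assoc, List.singleton_append]
      rw [hj]
      by_cases hin : PySem.Chars.isIn ['*', '/'] a = true
      · -- "*/" occurs in a: both sides are a
        have hgb : gBlock (a :: b :: ls'') = [a] := by
          rw [show gBlock (a :: b :: ls'') = if PySem.Chars.isIn ['*', '/'] a = true then [a] else a :: gBlock (b :: ls'') from rfl, if_pos hin]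
        rw [hgb, PySem.Chars.join_singleton]
        have hnn : 0 ≤ PySem.Chars.find a ['*', '/'] :=
          (PySem.Chars.find_nonneg_iff a _).mpr ((PySem.Chars.isIn_iff_infix _ a).mp hin)
        set k := (PySem.Chars.find a ['*', '/']).toNat with hk
        have hfa : PySem.Chars.find a ['*', '/'] = (k : Int) := by omega
        obtain ⟨hpre, -⟩ := PySem.Chars.find_spec hnn
        rw [← hk, pair_prefix_drop_iff] at hpre
        obtain ⟨hl2, -⟩ := List.getElem?_eq_some_iff.mp hpre.2
        unfold pvCB
        rw [find_append_found a r k hfa, if_neg (by omega),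
          PySem.Chars.findFrom_natCast _ ['\n'] k (by simp; omega),
          find_nl_drop a r k hna (by omega)]
        rw [if_neg (by omega)]
        have hc : (k : Int) + ((a.length - k : Nat) : Int) = ((a.length : Nat) : Int) := by omega
        rw [if_neg (by omega), hc, slice_none_natCast]
        simp
      · -- "*/" does not occur in a
        have hfa : PySem.Chars.find a ['*', '/'] = -1 := by
          rw [PySem.Chars.find_eq_neg_one_iff]
          intro hinf
          exact hin ((PySem.Chars.isIn_iff_infix _ a).mpr hinf)
        have hgb : gBlock (a :: b :: ls'') = a :: gBlock (b :: ls'') := by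
          rw [show gBlock (a :: b :: ls'') = if PySem.Chars.isIn ['*', '/'] a = true then [a] else a :: gBlock (b :: ls'') from rfl, if_neg hin]
        rw [hgb]
        rcases hgb' : gBlock (b :: ls'') with _ | ⟨g1, gtl⟩
        · exact absurd hgb' (gBlock_ne_nil b ls'')
        have hjoin2 : PySem.Chars.join ['\n'] (a :: g1 :: gtl) = a ++ '\n' :: PySem.Chars.join ['\n'] (g1 :: gtl) := by
          rw [PySem.Chars.join_cons_cons, List.append_assoc, List.singleton_append]
        rw [hjoin2, ← hgb', ← ihr, pvCB_step a r hfa]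

-- A's '/*' loop, mapped to char lists, is gBlock
lemma ABlock_map : ∀ (ls : List String) (acc : List String),
    (pvABlockLoop true acc ls).map String.toList =
      acc.map String.toList ++ gBlock (ls.map String.toList) := by
  intro ls
  induction ls with
  | nil => intro acc; simp [pvABlockLoop, gBlock]
  | cons line rest ih =>
    intro acc
    rw [pvABlockLoop, if_pos rfl]
    have hb : PySem.Str.isIn "*/" line = PySem.Chars.isIn ['*', '/'] line.toList := by
      rw [PySem.Str.isIn_eq]; rfl
    simp only [List.map_cons]
    rw [show gBlock (line.toList :: rest.map String.toList) =
      if PySem.Chars.isIn ['*', '/'] line.toList = true then [line.toList]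
      else line.toList :: gBlock (rest.map String.toList) from rfl]
    by_cases hc : PySem.Chars.isIn ['*', '/'] line.toList = true
    · rw [if_pos hc]
      simp only [hb, hc, if_true]
      simp
    · rw [if_neg hc]
      simp only [hb, eq_false_of_ne_true hc, if_false, Bool.false_eq_true]
      rw [ih]
      simp

-- A's '//' loop is take-until-first-bad-line
lemma ALine_take : ∀ (ls : List String) (acc : List String),
    pvALineLoop acc ls = acc ++ ls.take ((ls.findIdx? pvBBad).getD ls.length) := by
  intro ls
  induction ls with
  | nil => intro acc; simp [pvALineLoop]
  | cons line rest ih =>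
    intro acc
    rw [pvALineLoop, List.findIdx?_cons]
    by_cases hbad : pvBBad line = true
    · have h1 : PySem.Str.startswith (PySem.Str.strip line) "//" = false := by
        unfold pvBBad at hbad
        simp only [Bool.not_eq_true', Bool.or_eq_false_iff] at hbad
        exact hbad.1
      have h2 : ¬ (PySem.Str.strip line = "") := by
        unfold pvBBad at hbad
        simp only [Bool.not_eq_true', Bool.or_eq_false_iff] at hbad
        simpa using hbad.2
      rw [if_pos hbad]
      simp only [h1, Bool.false_eq_true, if_false, if_neg h2]
      simp
    · rw [if_neg hbad]
      have hkeep : PySem.Str.startswith (PySem.Str.strip line) "//" = true ∨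
          PySem.Str.strip line = "" := by
        unfold pvBBad at hbad
        simp only [Bool.not_eq_true, Bool.not_eq_false', Bool.or_eq_true_iff] at hbad
        rcases hbad with h | h
        · exact Or.inl h
        · exact Or.inr (by simpa using h)
      have hrec : pvALineLoop (acc ++ [line]) rest =
          (acc ++ [line]) ++ rest.take ((rest.findIdx? pvBBad).getD rest.length) := ih _
      have hgd : (Option.map (fun i => i + 1) (rest.findIdx? pvBBad)).getD (rest.length + 1) =
          ((rest.findIdx? pvBBad).getD rest.length) + 1 := by
        cases rest.findIdx? pvBBad <;> simp
      rcases hkeep with h | h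
      · rw [if_pos h]
        rw [hrec]
        simp only [List.length_cons, hgd, List.take_succ_cons]
        simp
      · rw [if_neg (show ¬(PySem.Str.startswith (PySem.Str.strip line) "//" = true) by rw [h]; decide), if_pos h]
        rw [hrec]
        simp only [List.length_cons, hgd, List.take_succ_cons]
        simp

-- text.split('\n') succeeds and is splitNl on char lists
lemma split_some (s : String) : ∃ L, PySem.Str.split? s "\n" = some L ∧
    L.map String.toList = splitNl s.toList := by
  have h := PySem.Str.split?_map s "\n"
  rw [show ("\n" : String).toList = ['\n'] from rfl] at h
  rw [PySem.Chars.split?] at h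
  simp only [List.isEmpty_cons, Bool.false_eq_true, if_false] at h
  rw [splitOn_nl] at h
  cases hc : PySem.Str.split? s "\n" with
  | none => rw [hc] at h; simp at h
  | some L =>
    rw [hc] at h
    simp only [Option.map_some] at h
    exact ⟨L, rfl, by injection h⟩

-- B's '/*' branch returns a value whose char list is pvCB
lemma B_block_branch (text : String) (out' : String) :
    (if PySem.Str.find text "*/" = -1 then some text
     else
       if PySem.Str.findFrom text "\n" (PySem.Str.find text "*/") none = -1 then some text
       else some (PySem.Str.slice text none
         (some (PySem.Str.findFrom text "\n" (PySem.Str.find text "*/") none)))) =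
      some out' → out'.toList = pvCB text.toList := by
  have hfe : PySem.Str.find text "*/" = PySem.Chars.find text.toList ['*', '/'] := by
    rw [PySem.Str.find_eq]; rfl
  have hffe : ∀ p : Int, PySem.Str.findFrom text "\n" p none =
      PySem.Chars.findFrom text.toList ['\n'] p none := by
    intro p; rw [PySem.Str.findFrom_eq]; rfl
  intro hsome
  simp only [pvCB]
  rw [hfe] at hsome
  by_cases hp : PySem.Chars.find text.toList ['*', '/'] = -1
  · rw [if_pos hp] at hsome
    rw [if_pos hp]
    injection hsome with h
    rw [← h]
  · rw [if_neg hp] at hsome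
    rw [hffe] at hsome
    rw [if_neg hp]
    by_cases hn : PySem.Chars.findFrom text.toList ['\n']
        (PySem.Chars.find text.toList ['*', '/']) none = -1
    · rw [if_pos hn] at hsome
      rw [if_pos hn]
      injection hsome with h
      rw [← h]
    · rw [if_neg hn] at hsome
      rw [if_neg hn]
      injection hsome with h
      rw [← h, PySem.Str.toList_slice, PySem.Chars.slice_eq_listSlice]

-- ===== VERDICT (by name: the statement is the Claim_ definition above) =====
theorem find_first_comment_block_spec : Claim_equal_find_first_comment_block := by
  intro content _
  unfold Spec_find_first_comment_block
  obtain ⟨L, hL, hmap⟩ := split_some (PySem.Str.strip content)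
  simp only [find_first_comment_block, find_first_comment_block_alt, hL, Option.getD_some]
  cases L with
  | nil =>
    exact absurd hmap.symm (by simpa using splitNl_ne_nil (PySem.Str.strip content).toList)
  | cons first rest =>
    simp only [List.headD_cons]
    by_cases h1 : PySem.Str.startswith (PySem.Str.strip first) "/*" = true
    · simp only [h1, if_true]
      obtain ⟨out', hout⟩ : ∃ o,
          (if PySem.Str.find (PySem.Str.strip content) "*/" = -1 then some (PySem.Str.strip content)
           else
             if PySem.Str.findFrom (PySem.Str.strip content) "\n"
                 (PySem.Str.find (PySem.Str.strip content) "*/") none = -1 then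
               some (PySem.Str.strip content)
             else some (PySem.Str.slice (PySem.Str.strip content) none
               (some (PySem.Str.findFrom (PySem.Str.strip content) "\n"
                 (PySem.Str.find (PySem.Str.strip content) "*/") none)))) = some o := by
        split_ifs <;> exact ⟨_, rfl⟩
      rw [hout]
      have hB := B_block_branch _ _ hout
      have hA : (PySem.Str.join "\n" (pvABlockLoop true [] (first :: rest))).toList =
          pvCB (PySem.Str.strip content).toList := by
        rw [PySem.Str.toList_join, show ("\n" : String).toList = ['\n'] from rfl, ABlock_map]
        simp only [List.map_nil, List.nil_append]
        rw [hmap, ← M (splitNl (PySem.Str.strip content).toList) (splitNl_ne_nil _)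
          (nl_not_mem_splitNl _), join_splitNl]
      exact congrArg some (String.toList_inj.mp (hA.trans hB.symm))
    · simp only [h1, Bool.false_eq_true, if_false]
      by_cases h2 : PySem.Str.startswith (PySem.Str.strip first) "//" = true
      · simp only [h2, if_true]
        rw [ALine_take]
        simp
      · simp only [h2, Bool.false_eq_true, if_false]
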